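-- pv_equiv track=rewrite | github.com/MilanDonhowe/AoC2020 | day16/solution_day_16.py | ticket_error_rate
-- ===== SOURCE A (Python) =====
-- def ticket_error_rate(valid_set, tickets):
--     error_rate = 0
--     valid_tickets = []
--     for ticket in tickets:
--         valid = True
--         for num in ticket:
--             if num not in valid_set:
--                 error_rate += num
--                 valid = False
--         if valid:
--             valid_tickets.append(ticket)
--
--     return error_rate, valid_tickets
-- ===== SOURCE B (Python) =====
-- def ticket_error_rate(valid_set, tickets):
--     vs = set(valid_set)
--     # frequency table of every value appearing on any ticket
--     counts = {}
--     for ticket in tickets: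
--         for n in ticket:
--             counts[n] = counts.get(n, 0) + 1
--     # the distinct invalid values that actually occur
--     bad = set(counts) - vs
--     # error rate aggregated by value: each bad value weighted by its multiplicity
--     error_rate = sum(n * counts[n] for n in bad)
--     # a ticket is valid iff it shares no value with the bad-value set
--     valid_tickets = [t for t in tickets if bad.isdisjoint(t)]
--     return error_rate, valid_tickets
-- ===== Notes on version B (the rewrite author's own statement) =====
-- stated objective: alternative
-- what changed: Replaced A's fused flag-carrying loop (per-occurrence membership scan of valid_set) with a value-frequency table: build a count dict of all ticket values, take the set difference of its keys with set(valid_set) to get the distinct bad values, sum n*count(n) over them for the error rate, and keep tickets disjoint from the bad-value set; it trades the per-occurrence scan for hash-table bookkeeping.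
import Mathlib
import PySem

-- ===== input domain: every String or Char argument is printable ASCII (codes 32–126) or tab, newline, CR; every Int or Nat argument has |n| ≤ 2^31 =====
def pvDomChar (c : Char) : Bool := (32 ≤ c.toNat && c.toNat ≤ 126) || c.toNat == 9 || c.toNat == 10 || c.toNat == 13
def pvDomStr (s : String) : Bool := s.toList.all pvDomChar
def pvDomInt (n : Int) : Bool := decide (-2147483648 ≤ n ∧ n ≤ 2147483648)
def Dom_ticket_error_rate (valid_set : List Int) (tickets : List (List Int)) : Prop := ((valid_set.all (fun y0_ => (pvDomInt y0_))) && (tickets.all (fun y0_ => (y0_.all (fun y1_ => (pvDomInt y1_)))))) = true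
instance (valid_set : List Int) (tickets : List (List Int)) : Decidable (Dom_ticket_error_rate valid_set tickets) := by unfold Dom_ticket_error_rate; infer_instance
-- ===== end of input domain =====

-- B replaces A's fused flag-carrying loop by a value-frequency table: it counts every
-- occurring value, sums the distinct bad values weighted by multiplicity, and keeps
-- tickets disjoint from the bad-value set (objective: alternative algorithm, aggregation by value).


-- ===== PORT A =====
-- fused loop: one pass over tickets, inner pass over each ticket carrying (error_rate, valid)
def ticket_error_rate (valid_set : List Int) (tickets : List (List Int)) : Int × List (List Int) :=
  let st := tickets.foldl (fun (st : Int × List (List Int)) ticket =>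
    let inner := ticket.foldl (fun (p : Int × Bool) num =>
      if ¬ valid_set.contains num then (p.1 + num, false) else p) (st.1, true)
    (inner.1, if inner.2 then st.2 ++ [ticket] else st.2)) (0, [])
  st

-- ===== PORT B =====
-- frequency table of all ticket values; bad = occurring values outside the valid set;
-- error rate = Σ n·count(n) over bad (int sum: Python's set-iteration order is immaterial);
-- valid tickets = tickets disjoint from bad
def ticket_error_rate_alt (valid_set : List Int) (tickets : List (List Int)) : Int × List (List Int) :=
  let vs := PySem.Set.ofList valid_set
  let counts := tickets.foldl (fun counts ticket =>
    ticket.foldl (fun (counts : PySem.Dict Int Int) n => counts.insert n (counts.getD n 0 + 1)) counts) PySem.Dict.empty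
  let bad := PySem.Set.diff (PySem.Set.ofList counts.keys) vs
  let error_rate := (bad.map (fun n => n * counts.getD n 0)).sum
  let valid_tickets := tickets.filter (fun t => PySem.Set.isdisjoint bad t)
  (error_rate, valid_tickets)

-- ===== PRECONDITION & SPEC =====
def Spec_ticket_error_rate (valid_set : List Int) (tickets : List (List Int)) (out : Int × List (List Int)) : Prop := out = ticket_error_rate_alt valid_set tickets
instance (valid_set : List Int) (tickets : List (List Int)) (out : Int × List (List Int)) : Decidable (Spec_ticket_error_rate valid_set tickets out) := by unfold Spec_ticket_error_rate; infer_instance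

-- ===== CLAIM (what is proved, stated in full; the proofs are below) =====
def Claim_equal_ticket_error_rate : Prop := ∀ (valid_set : List Int) (tickets : List (List Int)), Dom_ticket_error_rate valid_set tickets → Spec_ticket_error_rate valid_set tickets (ticket_error_rate valid_set tickets)

-- ===== LEMMAS AND PROOFS =====
-- A's inner loop over one ticket computes (e + sum of invalid values, b && all valid)
theorem ter_inner (vs : List Int) (t : List Int) (e : Int) (b : Bool) :
    t.foldl (fun (p : Int × Bool) num =>
      if ¬ vs.contains num then (p.1 + num, false) else p) (e, b)
    = (e + (t.filter (fun n => !vs.contains n)).sum,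
       b && t.all (fun n => vs.contains n)) := by
  induction t generalizing e b with
  | nil => simp
  | cons x xs ih =>
    rw [List.foldl_cons]
    by_cases h : x ∈ vs
    · rw [if_neg (by simp [h]), ih]
      simp [h]
    · rw [if_pos (by simp [h]), ih]
      simp [h, add_assoc]

-- A's outer loop from state (e, acc)
theorem ter_outer (vs : List Int) (ts : List (List Int)) (e : Int) (acc : List (List Int)) :
    ts.foldl (fun (st : Int × List (List Int)) t =>
      (st.1 + (t.filter (fun n => !vs.contains n)).sum,
       if t.all (fun n => vs.contains n) then st.2 ++ [t] else st.2)) (e, acc)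
    = (e + (ts.flatMap (fun t => t.filter (fun n => !vs.contains n))).sum,
       acc ++ ts.filter (fun t => t.all (fun n => vs.contains n))) := by
  induction ts generalizing e acc with
  | nil => simp
  | cons t ts ih =>
    simp only [List.foldl_cons]
    rw [ih]
    by_cases h : (t.all fun n => vs.contains n) = true
    · simp only [List.flatMap_cons, List.filter_cons, List.sum_append]
      rw [if_pos h, if_pos h]
      simp [add_assoc]
    · simp only [List.flatMap_cons, List.filter_cons, List.sum_append]
      rw [if_neg h, if_neg h]
      simp [add_assoc]

-- A's value in closed form
theorem ter_A_closed (vs : List Int) (ts : List (List Int)) :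
    ticket_error_rate vs ts
    = ((ts.flatMap (fun t => t.filter (fun n => !vs.contains n))).sum,
       ts.filter (fun t => t.all (fun n => vs.contains n))) := by
  have hstep : (fun (st : Int × List (List Int)) ticket =>
      let inner := ticket.foldl (fun (p : Int × Bool) num =>
        if ¬ vs.contains num then (p.1 + num, false) else p) (st.1, true)
      (inner.1, if inner.2 then st.2 ++ [ticket] else st.2))
    = (fun (st : Int × List (List Int)) t =>
      (st.1 + (t.filter (fun n => !vs.contains n)).sum,
       if t.all (fun n => vs.contains n) then st.2 ++ [t] else st.2)) := by
    funext st t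
    simp only [ter_inner]
    simp
  simp only [ticket_error_rate]
  rw [hstep, ter_outer]
  simp

-- nested counting loop = counting loop over the flattened list
theorem foldl_nested (ts : List (List Int)) (f : PySem.Dict Int Int → Int → PySem.Dict Int Int)
    (d : PySem.Dict Int Int) :
    ts.foldl (fun d t => t.foldl f d) d = (ts.flatMap id).foldl f d := by
  induction ts generalizing d with
  | nil => simp
  | cons t ts ih => simp [List.foldl_append, ih]

-- mapping per-ticket filters = filtering the flattened list
theorem flatMap_filter (ts : List (List Int)) (p : Int → Bool) :
    ts.flatMap (fun t => t.filter p) = (ts.flatMap id).filter p := by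
  induction ts with
  | nil => simp
  | cons t ts ih => simp [List.filter_append, ih]

-- set(…) of an already-duplicate-free list is the list itself
theorem foldl_add_nodup (l acc : List Int) (h : (acc ++ l).Nodup) :
    l.foldl PySem.Set.add acc = acc ++ l := by
  induction l generalizing acc with
  | nil => simp
  | cons x xs ih =>
    have hx : x ∉ acc := fun hm => (List.disjoint_of_nodup_append h) hm (by simp)
    rw [List.foldl_cons]
    have : PySem.Set.add acc x = acc ++ [x] := by
      simp [PySem.Set.add, PySem.Set.contains, hx]
    rw [this, ih (acc ++ [x]) (by simpa using h)]
    simp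

theorem ofList_nodup (l : List Int) (h : l.Nodup) : PySem.Set.ofList l = l := by
  rw [PySem.Set.ofList_eq_foldl]
  simpa using foldl_add_nodup l [] (by simpa using h)

-- Σ over a nodup list of an indicator-weighted term
theorem sum_indicator (l : List Int) (h : l.Nodup) (x : Int) :
    (l.map (fun n => if n = x then n else 0)).sum = if x ∈ l then x else 0 := by
  induction l with
  | nil => simp
  | cons a as ih =>
    have has : as.Nodup := (List.nodup_cons.mp h).2
    simp only [List.map_cons, List.sum_cons, ih has]
    by_cases hax : a = x
    · have hxs : x ∉ as := hax ▸ (List.nodup_cons.mp h).1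
      simp [hax, hxs]
    · by_cases hx : x ∈ as <;> simp [hax, hx, Ne.symm hax]

-- sum grouped by distinct value = plain filtered sum
theorem sum_mul_count (d : List Int) (p : Int → Bool) (hd : d.Nodup) :
    ∀ (l : List Int), (∀ x ∈ l, x ∈ d) →
    ((d.filter p).map (fun n => n * (l.count n : Int))).sum = (l.filter p).sum := by
  intro l
  induction l with
  | nil => intro _; simp
  | cons x xs ih =>
    intro hsub
    have hxd : x ∈ d := hsub x (by simp)
    have hxs : ∀ y ∈ xs, y ∈ d := fun y hy => hsub y (by simp [hy])
    have hcount : ∀ n : Int, ((x :: xs).count n : Int) = (xs.count n : Int) + (if n = x then 1 else 0) := by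
      intro n
      rw [List.count_cons]
      by_cases hnx : n = x
      · simp [hnx]
      · simp [hnx]
        exact fun h => hnx h.symm
    have hsplit : ((d.filter p).map (fun n => n * ((x :: xs).count n : Int))).sum
        = ((d.filter p).map (fun n => n * (xs.count n : Int))).sum
          + ((d.filter p).map (fun n => if n = x then n else 0)).sum := by
      rw [← List.sum_map_add]
      congr 1
      apply List.map_congr_left
      intro n _
      rw [hcount n]
      by_cases hnx : n = x
      · simp [hnx]; ring
      · simp [hnx]
    rw [hsplit, ih hxs, sum_indicator _ (List.Nodup.filter p hd) x]
    have hxmem : x ∈ d.filter p ↔ p x = true := by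
      simp [List.mem_filter, hxd]
    by_cases hp : p x = true
    · rw [if_pos (hxmem.mpr hp)]
      simp [hp]
      ring
    · rw [if_neg (fun hm => hp (hxmem.mp hm))]
      simp [hp]

-- ===== VERDICT (by name: the statement is the Claim_ definition above) =====
-- per-ticket: all-valid = disjoint from the bad-value set (ticket values all occur in the flattened list)
theorem all_valid_eq_isdisjoint (vs : List Int) (ts : List (List Int)) (t : List Int)
    (hmem : ∀ n, n ∈ t → n ∈ ts.flatMap id) :
    (t.all (fun n => vs.contains n))
      = PySem.Set.isdisjoint ((PySem.Set.ofList (ts.flatMap id)).filter (fun n => !vs.contains n)) t := by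
  rw [Bool.eq_iff_iff]
  simp only [PySem.Set.isdisjoint, PySem.Set.contains, List.all_eq_true, Bool.not_eq_true',
    List.any_eq_false, List.mem_filter, PySem.Set.mem_ofList, List.contains_iff_mem]
  constructor
  · rintro hall x ⟨-, hxbad⟩ hxt
    simp [hall x hxt] at hxbad
  · intro hno x hxt
    by_contra hxvs
    exact hno x ⟨hmem x hxt, by simpa using hxvs⟩ hxt

-- ===== VERDICT (by name: the statement is the Claim_ definition above) =====
theorem ticket_error_rate_spec : Claim_equal_ticket_error_rate := by
  intro vs ts _
  show ticket_error_rate vs ts = ticket_error_rate_alt vs ts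
  have hcont : ∀ n : Int, (PySem.Set.ofList vs).contains n = vs.contains n := by
    intro n
    simp [PySem.Set.contains, PySem.Set.mem_ofList]
  have hoo : PySem.Set.ofList (PySem.Set.ofList (ts.flatMap id)) = PySem.Set.ofList (ts.flatMap id) :=
    ofList_nodup _ (PySem.Set.nodup_ofList _)
  have h1 : (ts.flatMap (fun t => t.filter (fun n => !vs.contains n))).sum
      = (((PySem.Set.ofList (ts.flatMap id)).filter (fun n => !vs.contains n)).map
          (fun n => n * ((ts.flatMap id).count n : Int))).sum := by
    rw [flatMap_filter,
      sum_mul_count _ _ (PySem.Set.nodup_ofList _) _ (fun x hx => (PySem.Set.mem_ofList _ _).mpr hx)]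
  have h2 : ts.filter (fun t => t.all (fun n => vs.contains n))
      = ts.filter (fun t => PySem.Set.isdisjoint
          ((PySem.Set.ofList (ts.flatMap id)).filter (fun n => !vs.contains n)) t) := by
    apply List.filter_congr
    intro t ht
    exact all_valid_eq_isdisjoint vs ts t
      (fun n hn => List.mem_flatMap.mpr ⟨t, ht, by simpa using hn⟩)
  rw [ter_A_closed, h1, h2]
  simp only [ticket_error_rate_alt, foldl_nested, PySem.Dict.foldl_insert_getD_add_one_eq_counter,
    PySem.Dict.keys_counter, PySem.Dict.getD_counter, PySem.Set.diff, hcont, hoo]
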